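-- pv_equiv track=rewrite | github.com/LiShuMing/xlab | python/projects/py-optimizer2/src/scanners/optgen_scanner.py | _extract_optgen_comment
-- ===== SOURCE A (Python) =====
-- def _extract_optgen_comment(content: str, pos: int) -> str:
--     """Extract # comment lines before position."""
--     lines = content[:pos].split("\n")
--     comment_lines = []
--
--     for line in reversed(lines):
--         stripped = line.strip()
--         if stripped.startswith("#"):
--             comment_lines.insert(0, stripped)
--         elif stripped == "":
--             continue
--         else:
--             break
--
--     return "\n".join(comment_lines)
-- ===== SOURCE B (Python) =====
-- def _extract_optgen_comment(content: str, pos: int) -> str: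
--     """Extract # comment lines before position (two staged passes)."""
--     lines = content[:pos].split("\n")
--     # pass 1: index just after the last code line (non-blank, non-comment)
--     start = 0
--     for i, line in enumerate(lines):
--         s = line.strip()
--         if s != "" and not s.startswith("#"):
--             start = i + 1
--     # pass 2: keep the stripped comment lines of the tail
--     return "\n".join(s for s in (line.strip() for line in lines[start:])
--                      if s.startswith("#"))
-- ===== Notes on version B (the rewrite author's own statement) =====
-- stated objective: alternative
-- what changed: Replaces A's backward scan with break and insert(0) by two staged forward passes: first compute the index after the last code line, then slice the tail and filter/strip its comment lines.
import Mathlib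
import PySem

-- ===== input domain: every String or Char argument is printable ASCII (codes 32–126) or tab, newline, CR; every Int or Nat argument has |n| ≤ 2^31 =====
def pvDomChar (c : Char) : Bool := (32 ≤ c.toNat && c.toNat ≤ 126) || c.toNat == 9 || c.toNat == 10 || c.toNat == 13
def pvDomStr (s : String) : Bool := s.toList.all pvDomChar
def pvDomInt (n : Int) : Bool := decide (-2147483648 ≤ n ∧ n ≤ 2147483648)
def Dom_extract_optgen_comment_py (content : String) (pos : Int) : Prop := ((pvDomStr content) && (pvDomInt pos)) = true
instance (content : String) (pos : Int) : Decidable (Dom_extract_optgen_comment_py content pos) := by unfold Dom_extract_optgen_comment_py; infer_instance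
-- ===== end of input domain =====

-- B replaces A's single backward scan (break + insert(0)) by two staged forward passes:
-- find the index after the last code line, then slice the tail and filter its comments.

-- ===== PORT A =====
-- the reversed loop of A: prepend each stripped comment (insert(0)), skip blanks, break on code
def pvLoopA : List String → List String → List String
  | [], comment_lines => comment_lines
  | line :: rest, comment_lines =>
    let stripped := PySem.Str.strip line
    if PySem.Str.startswith stripped "#" then pvLoopA rest (stripped :: comment_lines)
    else if stripped = "" then pvLoopA rest comment_lines
    else comment_lines

def extract_optgen_comment_py (content : String) (pos : Int) : String :=
  let lines := (PySem.Str.split? (PySem.Str.slice content none (some pos)) "\n").getD []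
  PySem.Str.join "\n" (pvLoopA lines.reverse [])

-- ===== PORT B =====
-- pass 1 of B: fold forward over (index, line), remembering the index after the last code line
def pvStartLoop : List String → Nat → Nat → Nat
  | [], _, start => start
  | line :: rest, i, start =>
    let s := PySem.Str.strip line
    if s ≠ "" ∧ PySem.Str.startswith s "#" = false then pvStartLoop rest (i + 1) (i + 1)
    else pvStartLoop rest (i + 1) start

def extract_optgen_comment_py_alt (content : String) (pos : Int) : String :=
  let lines := (PySem.Str.split? (PySem.Str.slice content none (some pos)) "\n").getD []
  let start := pvStartLoop lines 0 0
  -- pass 2 of B: lines[start:], stripped, keeping only the comment lines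
  PySem.Str.join "\n"
    ((lines.drop start).filterMap (fun line =>
      let s := PySem.Str.strip line
      if PySem.Str.startswith s "#" then some s else none))

-- ===== PRECONDITION & SPEC =====
def Spec_extract_optgen_comment_py (content : String) (pos : Int) (out : String) : Prop := out = extract_optgen_comment_py_alt content pos
instance (content : String) (pos : Int) (out : String) : Decidable (Spec_extract_optgen_comment_py content pos out) := by unfold Spec_extract_optgen_comment_py; infer_instance

-- ===== CLAIM (what is proved, stated in full; the proofs are below) =====
def Claim_equal_extract_optgen_comment_py : Prop := ∀ (content : String) (pos : Int), Dom_extract_optgen_comment_py content pos → Spec_extract_optgen_comment_py content pos (extract_optgen_comment_py content pos)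

-- ===== LEMMAS AND PROOFS =====

-- named copy of B's filter (definitionally equal to the lambda in the port)
def pvF (line : String) : Option String :=
  let s := PySem.Str.strip line
  if PySem.Str.startswith s "#" then some s else none

theorem pvF_def : (fun line => (
    let s := PySem.Str.strip line
    if PySem.Str.startswith s "#" then some s else none : Option String)) = pvF := rfl

theorem pvF_comment (l : String) (hc : PySem.Str.startswith (PySem.Str.strip l) "#" = true) :
    pvF l = some (PySem.Str.strip l) := by
  unfold pvF; rw [if_pos hc]

theorem pvF_not (l : String) (hc : ¬ PySem.Str.startswith (PySem.Str.strip l) "#" = true) :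
    pvF l = none := by
  unfold pvF; rw [if_neg hc]

-- the trailing comment block of a REVERSED line list, nearest-to-pos first
def pvC : List String → List String
  | [] => []
  | line :: rest =>
    let stripped := PySem.Str.strip line
    if PySem.Str.startswith stripped "#" then stripped :: pvC rest
    else if stripped = "" then pvC rest
    else []

theorem pvLoopA_eq (rl acc : List String) : pvLoopA rl acc = (pvC rl).reverse ++ acc := by
  induction rl generalizing acc with
  | nil => simp [pvLoopA, pvC]
  | cons l rest ih =>
    simp only [pvLoopA, pvC]
    split_ifs <;> simp [ih]

theorem pvStartLoop_snoc (xs : List String) (l : String) (i start : Nat) :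
    pvStartLoop (xs ++ [l]) i start =
      if PySem.Str.strip l ≠ "" ∧ PySem.Str.startswith (PySem.Str.strip l) "#" = false
      then i + xs.length + 1 else pvStartLoop xs i start := by
  induction xs generalizing i start with
  | nil =>
    simp only [List.nil_append, pvStartLoop, List.length_nil]
  | cons x rest ih =>
    simp only [List.cons_append, pvStartLoop, ih, List.length_cons]
    all_goals split_ifs <;> omega

theorem pvStartLoop_le (xs : List String) (i start : Nat) (h : start ≤ i) :
    pvStartLoop xs i start ≤ i + xs.length := by
  induction xs generalizing i start with
  | nil => simpa [pvStartLoop] using h.trans (Nat.le_add_right i 0)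
  | cons x rest ih =>
    simp only [pvStartLoop, List.length_cons]
    split_ifs
    · have := ih (i + 1) (i + 1) (le_refl _); omega
    · have := ih (i + 1) start (by omega); omega

-- the bridge: A's backward-collected block equals B's drop-then-filter of the same lines
theorem pvMain (lines : List String) :
    (pvC lines.reverse).reverse =
      (lines.drop (pvStartLoop lines 0 0)).filterMap pvF := by
  induction lines using List.reverseRecOn with
  | nil => simp [pvC, pvStartLoop]
  | append_singleton xs l ih =>
    have hle : pvStartLoop xs 0 0 ≤ xs.length := by
      simpa using pvStartLoop_le xs 0 0 (le_refl 0)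
    rw [pvStartLoop_snoc]
    simp only [List.reverse_append, List.reverse_cons, List.reverse_nil, List.nil_append,
      List.singleton_append, pvC]
    by_cases hc : PySem.Str.startswith (PySem.Str.strip l) "#" = true
    · have hcond : ¬ (PySem.Str.strip l ≠ "" ∧ PySem.Str.startswith (PySem.Str.strip l) "#" = false) := by
        intro h; rw [h.2] at hc; exact Bool.false_ne_true hc
      rw [if_neg hcond, if_pos hc, List.drop_append_of_le_length hle, List.filterMap_append,
        List.reverse_cons, ih]
      simp only [List.filterMap_cons, List.filterMap_nil, pvF_comment l hc]
    · by_cases hb : PySem.Str.strip l = ""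
      · have hcond : ¬ (PySem.Str.strip l ≠ "" ∧ PySem.Str.startswith (PySem.Str.strip l) "#" = false) := by
          intro h; exact h.1 hb
        rw [if_neg hcond, if_neg hc, if_pos hb, List.drop_append_of_le_length hle,
          List.filterMap_append, ih]
        simp only [List.filterMap_cons, List.filterMap_nil, pvF_not l hc, List.append_nil]
      · have hcond : PySem.Str.strip l ≠ "" ∧ PySem.Str.startswith (PySem.Str.strip l) "#" = false := by
          exact ⟨hb, Bool.eq_false_iff.mpr (fun h => hc h)⟩
        rw [if_pos hcond, if_neg hc, if_neg hb]
        have hlen : 0 + xs.length + 1 = (xs ++ [l]).length := by simp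
        rw [hlen, List.drop_length]
        simp

-- ===== VERDICT (by name: the statement is the Claim_ definition above) =====
theorem extract_optgen_comment_py_spec : Claim_equal_extract_optgen_comment_py := by
  intro content pos _
  simp only [Spec_extract_optgen_comment_py, extract_optgen_comment_py,
    extract_optgen_comment_py_alt, pvLoopA_eq, List.append_nil, pvF_def, pvMain]
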